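-- pv_equiv track=rewrite | github.com/JGrant3101/MFEVDGToolbox | Python/SeasonSummaryUserMaths/createBooleanChannelsList.py | createBooleanChannelsList
-- ===== SOURCE A (Python) =====
-- def createBooleanChannelsList(n, names):
--     # Calculate the number of gating boolean channels that will need to be defined.
--     nBooleans = n + 11
--     # Initialise the list that will be populated with the dictionaries.
--     channels = [None] * nBooleans
--
--     for i in range (0, nBooleans):
--         # Deal with the 11 known loops first.
--         if i < 11:
--             # Initialise an empty dictionary.
--             tempDict = {}
--
--             # Assign the name of the boolean zone from the names input array.
--             tempDict['name'] = names[i]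
--
--             # Define the units as empty as these are all unitless booleans.
--             tempDict['units'] = ''
--
--             # Define the logical expression based on what the index is.
--             if i == 0 or i == 3:
--                 tempDict['expression'] = 'step(track.userPOIs.points[' + str(i) + '].sLapValue - sLap)'
--             elif i == 2 or i == 10:
--                 tempDict['expression'] = 'step(sLap - track.userPOIs.points[' + str(i - 1) + '].sLapValue)'
--             else:
--                 tempDict['expression'] = 'step(track.userPOIs.points[' + str(i) + '].sLapValue - sLap) * step(sLap - track.userPOIs.points[' + str(i - 1) + '].sLapValue)'
--
--             # Define the description as empty as these channels don't need a description.
--             tempDict['description'] = ''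
--
--             # Finally assign the temporary dictionary to the correct item in the channels list.
--             channels[i] = tempDict
--         # Deal with the turn zones, the number of which can vary.
--         else:
--             # Initialise an empty dictionary.
--             tempDict = {}
--
--             # Define the name based on the index.
--             tempDict['name'] = names[i]
--
--             # Define the units as empty as these are all unitless booleans.
--             tempDict['units'] = ''
--
--             # Define the logical expression based on what the index is.
--             if i == 11:
--                 tempDict['expression'] = 'step(track.userPOIs.points[' + str(i) + '].sLapValue - sLap)'
--             elif i == nBooleans - 1:
--                 tempDict['expression'] = 'step(sLap - track.userPOIs.points[' + str(i - 1) + '].sLapValue)'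
--             else:
--                 tempDict['expression'] = 'step(track.userPOIs.points[' + str(i) + '].sLapValue - sLap) * step(sLap - track.userPOIs.points[' + str(i - 1) + '].sLapValue)'
--
--             # Define the description as empty as these channels don't need a description.
--             tempDict['description'] = ''
--
--             # Finall assign the remporary dictionary to the correct item in the channels list.
--             channels[i] = tempDict
--
--     # Return the now populate list.
--     return channels
-- ===== SOURCE B (Python) =====
-- def _start(i):
--     return 'step(track.userPOIs.points[' + str(i) + '].sLapValue - sLap)'
--
-- def _end(i):
--     return 'step(sLap - track.userPOIs.points[' + str(i - 1) + '].sLapValue)'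
--
-- def _both(i):
--     return _start(i) + ' * ' + _end(i)
--
-- # The first 11 expressions never depend on n: a fixed table.
-- _FIXED = [_start(0), _both(1), _end(2), _start(3), _both(4), _both(5),
--           _both(6), _both(7), _both(8), _both(9), _end(10)]
--
-- def createBooleanChannelsList(n, names):
--     nBooleans = n + 11
--     if nBooleans <= 11:
--         exprs = _FIXED[:max(nBooleans, 0)]
--     else:
--         exprs = (_FIXED + [_start(11)]
--                  + [_both(i) for i in range(12, nBooleans - 1)]
--                  + ([_end(nBooleans - 1)] if nBooleans >= 13 else []))
--     return [{'name': names[i], 'units': '', 'expression': e, 'description': ''}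
--             for i, e in enumerate(exprs)]
-- ===== Notes on version B (the rewrite author's own statement) =====
-- stated objective: simpler
-- what changed: Replaces A's single loop with its duplicated i<11 / i>=11 if-cascades by a staged construction: a precomputed 11-entry literal table for the fixed expressions, concatenated with a generated start entry, middle segment and end entry, then one enumerate pass that attaches names[i], units and description to each expression.
import Mathlib
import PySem

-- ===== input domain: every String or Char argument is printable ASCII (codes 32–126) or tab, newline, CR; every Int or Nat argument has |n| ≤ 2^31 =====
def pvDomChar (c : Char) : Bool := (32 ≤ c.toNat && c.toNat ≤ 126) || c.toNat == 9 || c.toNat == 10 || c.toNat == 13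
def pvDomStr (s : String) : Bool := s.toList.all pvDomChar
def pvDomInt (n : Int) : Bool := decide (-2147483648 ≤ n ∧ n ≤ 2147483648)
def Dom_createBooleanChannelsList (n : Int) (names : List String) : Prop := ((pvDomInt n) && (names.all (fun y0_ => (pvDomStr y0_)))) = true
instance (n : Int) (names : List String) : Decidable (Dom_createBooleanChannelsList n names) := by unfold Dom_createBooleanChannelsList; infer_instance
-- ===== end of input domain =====

-- B replaces A's per-index branch cascade by a staged construction: a fixed literal table for
-- the first 11 expressions, concatenated with generated start/middle/end segments, then one
-- enumerate pass attaching names (objective: simpler); same return value wherever A returns.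

-- ===== PORT A =====
-- names[i] is ported with pyGet?; the .getD "" default is unreachable under
-- Pre_createBooleanChannelsList, which keeps every loop index in range (Python raises IndexError there).
def createBooleanChannelsList (n : Int) (names : List String) : List (List (String × String)) :=
  let nBooleans : Int := n + 11
  (PySem.List.pyRange 0 nBooleans 1).map (fun i =>
    if i < 11 then
      [("name", (PySem.List.pyGet? names i).getD ""),
       ("units", ""),
       ("expression",
         if i == 0 || i == 3 then
           "step(track.userPOIs.points[" ++ PySem.Int.toStr i ++ "].sLapValue - sLap)"
         else if i == 2 || i == 10 then
           "step(sLap - track.userPOIs.points[" ++ PySem.Int.toStr (i - 1) ++ "].sLapValue)"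
         else
           "step(track.userPOIs.points[" ++ PySem.Int.toStr i ++ "].sLapValue - sLap) * step(sLap - track.userPOIs.points[" ++ PySem.Int.toStr (i - 1) ++ "].sLapValue)"),
       ("description", "")]
    else
      [("name", (PySem.List.pyGet? names i).getD ""),
       ("units", ""),
       ("expression",
         if i == 11 then
           "step(track.userPOIs.points[" ++ PySem.Int.toStr i ++ "].sLapValue - sLap)"
         else if i == nBooleans - 1 then
           "step(sLap - track.userPOIs.points[" ++ PySem.Int.toStr (i - 1) ++ "].sLapValue)"
         else
           "step(track.userPOIs.points[" ++ PySem.Int.toStr i ++ "].sLapValue - sLap) * step(sLap - track.userPOIs.points[" ++ PySem.Int.toStr (i - 1) ++ "].sLapValue)"),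
       ("description", "")])

-- ===== PORT B =====
def pvStartE (i : Int) : String :=
  "step(track.userPOIs.points[" ++ PySem.Int.toStr i ++ "].sLapValue - sLap)"
def pvEndE (i : Int) : String :=
  "step(sLap - track.userPOIs.points[" ++ PySem.Int.toStr (i - 1) ++ "].sLapValue)"
def pvBothE (i : Int) : String := pvStartE i ++ " * " ++ pvEndE i

-- the fixed table _FIXED of Source B: the first 11 expressions never depend on n
def pvFixed : List String :=
  [pvStartE 0, pvBothE 1, pvEndE 2, pvStartE 3, pvBothE 4, pvBothE 5,
   pvBothE 6, pvBothE 7, pvBothE 8, pvBothE 9, pvEndE 10]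

def createBooleanChannelsList_alt (n : Int) (names : List String) : List (List (String × String)) :=
  let nBooleans : Int := n + 11
  let exprs : List String :=
    if nBooleans ≤ 11 then pvFixed.take (max nBooleans 0).toNat
    else pvFixed ++ [pvStartE 11]
         ++ (PySem.List.pyRange 12 (nBooleans - 1) 1).map pvBothE
         ++ (if 13 ≤ nBooleans then [pvEndE (nBooleans - 1)] else [])
  (PySem.List.enumerate exprs 0).map (fun p =>
    [("name", (PySem.List.pyGet? names p.1).getD ""),
     ("units", ""),
     ("expression", p.2),
     ("description", "")])

-- ===== PRECONDITION & SPEC =====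
-- Pre_ excludes exactly the inputs where Python A raises IndexError at names[i]: the loop runs
-- over range(n+11), so names needs at least n+11 entries (trivially true when the loop is empty).
def Pre_createBooleanChannelsList (n : Int) (names : List String) : Prop :=
  n + 11 ≤ (names.length : Int)
instance (n : Int) (names : List String) : Decidable (Pre_createBooleanChannelsList n names) := by
  unfold Pre_createBooleanChannelsList; infer_instance
def pvWitness_createBooleanChannelsList : Int × List String :=
  (1, ["a", "b", "c", "d", "e", "f", "g", "h", "i", "j", "k", "l"])

def Spec_createBooleanChannelsList (n : Int) (names : List String) (out : List (List (String × String))) : Prop := out = createBooleanChannelsList_alt n names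
instance (n : Int) (names : List String) (out : List (List (String × String))) : Decidable (Spec_createBooleanChannelsList n names out) := by unfold Spec_createBooleanChannelsList; infer_instance

-- ===== CLAIM (what is proved, stated in full; the proofs are below) =====
def Claim_equal_createBooleanChannelsList : Prop := ∀ (n : Int) (names : List String), Dom_createBooleanChannelsList n names → Pre_createBooleanChannelsList n names → Spec_createBooleanChannelsList n names (createBooleanChannelsList n names)

-- ===== LEMMAS AND PROOFS =====

-- A's expression if-tree, named so the two ports can be compared per index.
def pvEA (nB i : Int) : String :=
  if i < 11 then
    if i == 0 || i == 3 then
      "step(track.userPOIs.points[" ++ PySem.Int.toStr i ++ "].sLapValue - sLap)"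
    else if i == 2 || i == 10 then
      "step(sLap - track.userPOIs.points[" ++ PySem.Int.toStr (i - 1) ++ "].sLapValue)"
    else
      "step(track.userPOIs.points[" ++ PySem.Int.toStr i ++ "].sLapValue - sLap) * step(sLap - track.userPOIs.points[" ++ PySem.Int.toStr (i - 1) ++ "].sLapValue)"
  else
    if i == 11 then
      "step(track.userPOIs.points[" ++ PySem.Int.toStr i ++ "].sLapValue - sLap)"
    else if i == nB - 1 then
      "step(sLap - track.userPOIs.points[" ++ PySem.Int.toStr (i - 1) ++ "].sLapValue)"
    else
      "step(track.userPOIs.points[" ++ PySem.Int.toStr i ++ "].sLapValue - sLap) * step(sLap - track.userPOIs.points[" ++ PySem.Int.toStr (i - 1) ++ "].sLapValue)"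

-- Folding the literal tail of A's combined expression around a free suffix.
theorem pvFold (z : String) :
    "].sLapValue - sLap) * step(sLap - track.userPOIs.points[" ++ z =
    "].sLapValue - sLap)" ++ (" * " ++ ("step(sLap - track.userPOIs.points[" ++ z)) := by
  rw [← String.append_assoc, ← String.append_assoc]
  rfl

-- A's single-literal combined expression equals B's start ++ " * " ++ end assembly.
theorem pvConcat (i : Int) :
    "step(track.userPOIs.points[" ++ PySem.Int.toStr i ++ "].sLapValue - sLap) * step(sLap - track.userPOIs.points[" ++ PySem.Int.toStr (i - 1) ++ "].sLapValue)" =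
    pvBothE i := by
  simp only [pvBothE, pvStartE, pvEndE, String.append_assoc, pvFold]

-- B's staged expression list is exactly A's expression at every index of range(nBooleans).
theorem pvExprs_eq (m : Int) :
    (if m ≤ 11 then pvFixed.take (max m 0).toNat
     else pvFixed ++ [pvStartE 11]
          ++ (PySem.List.pyRange 12 (m - 1) 1).map pvBothE
          ++ (if 13 ≤ m then [pvEndE (m - 1)] else [])) =
    (PySem.List.pyRange 0 m 1).map (pvEA m) := by
  by_cases hm : m ≤ 11
  · rw [if_pos hm]
    by_cases h0 : m ≤ 0
    · rw [PySem.List.pyRange_one_eq_nil (by omega), show (max m 0).toNat = 0 by omega]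
      rfl
    · have h1 : 1 ≤ m := by omega
      interval_cases m <;> rfl
  · rw [if_neg hm]
    have hsplit := PySem.List.pyRange_one_append 0 12 m (by omega) (by omega)
    have hfront : (PySem.List.pyRange 0 12 1).map (pvEA m) = pvFixed ++ [pvStartE 11] := by
      rw [show PySem.List.pyRange 0 12 1 =
          [0, 1, 2, 3, 4, 5, 6, 7, 8, 9, 10, 11] from rfl]
      simp only [List.map_cons, List.map_nil]
      rw [show pvEA m 0 = pvStartE 0 from rfl, show pvEA m 1 = pvBothE 1 from pvConcat 1,
        show pvEA m 2 = pvEndE 2 from rfl, show pvEA m 3 = pvStartE 3 from rfl,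
        show pvEA m 4 = pvBothE 4 from pvConcat 4, show pvEA m 5 = pvBothE 5 from pvConcat 5,
        show pvEA m 6 = pvBothE 6 from pvConcat 6, show pvEA m 7 = pvBothE 7 from pvConcat 7,
        show pvEA m 8 = pvBothE 8 from pvConcat 8, show pvEA m 9 = pvBothE 9 from pvConcat 9,
        show pvEA m 10 = pvEndE 10 from rfl, show pvEA m 11 = pvStartE 11 from rfl]
      rfl
    by_cases h13 : 13 ≤ m
    · have hsucc := PySem.List.pyRange_one_succ_right (show (12:Int) ≤ m - 1 by omega)
      rw [show m - 1 + 1 = m from by omega] at hsucc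
      have hmid : (PySem.List.pyRange 12 (m - 1) 1).map (pvEA m) =
          (PySem.List.pyRange 12 (m - 1) 1).map pvBothE := by
        refine List.map_congr_left fun i hi => ?_
        rw [PySem.List.mem_pyRange_one] at hi
        simp only [pvEA]
        rw [if_neg (by omega), if_neg (by simp only [beq_iff_eq]; omega),
          if_neg (by simp only [beq_iff_eq]; omega)]
        exact pvConcat i
      have hlast : pvEA m (m - 1) = pvEndE (m - 1) := by
        simp only [pvEA]
        rw [if_neg (by omega), if_neg (by simp only [beq_iff_eq]; omega),
          if_pos (by simp only [beq_iff_eq])]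
        rfl
      rw [hsplit, hsucc, if_pos h13]
      simp only [List.map_append, hfront, List.map_cons, List.map_nil, hlast, hmid,
        List.append_assoc]
    · have hm12 : m = 12 := by omega
      subst hm12
      rw [hsplit, if_neg (by omega), show (12:Int) - 1 = 11 from rfl,
        PySem.List.pyRange_one_eq_nil (show (11:Int) ≤ 12 by omega),
        PySem.List.pyRange_one_eq_nil (show (12:Int) ≤ 12 by omega)]
      simp only [hfront, List.map_nil, List.append_nil]

-- ===== VERDICT (by name: the statement is the Claim_ definition above) =====
theorem createBooleanChannelsList_spec : Claim_equal_createBooleanChannelsList := by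
  intro n names _ _
  show createBooleanChannelsList n names = createBooleanChannelsList_alt n names
  have hA : createBooleanChannelsList n names =
      (PySem.List.pyRange 0 (n + 11) 1).map (fun i =>
        [("name", (PySem.List.pyGet? names i).getD ""), ("units", ""),
         ("expression", pvEA (n + 11) i), ("description", "")]) := by
    rw [createBooleanChannelsList]
    refine List.map_congr_left fun i _ => ?_
    simp only [pvEA]
    by_cases hi : i < 11
    · simp only [if_pos hi]
    · simp only [if_neg hi]
  have hB : createBooleanChannelsList_alt n names =
      (PySem.List.enumerate ((PySem.List.pyRange 0 (n + 11) 1).map (pvEA (n + 11))) 0).map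
        (fun p =>
          [("name", (PySem.List.pyGet? names p.1).getD ""), ("units", ""),
           ("expression", p.2), ("description", "")]) := by
    rw [createBooleanChannelsList_alt, pvExprs_eq]
  rw [hA, hB]
  apply List.ext_getElem
  · simp [PySem.List.length_enumerate]
  · intro k h1 h2
    simp [PySem.List.getElem_enumerate, PySem.List.getElem_pyRange_one]
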